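-- pv_equiv track=rewrite | github.com/Frederico-Messa/Modus-Five | Modus Five/modus five.py | differentAliveSoldiers
-- ===== SOURCE A (Python) =====
-- def aliveSoldiers(localBelligerents, team):
-- 	localBelligerents = list(localBelligerents)
-- 	AliveSoldiers = set()
-- 	for soldier in range(5):
-- 		if (localBelligerents[team][soldier] != 0):
-- 			AliveSoldiers.add(soldier)
-- 	return AliveSoldiers
--
-- def differentAliveSoldiers(localBelligerents, team):
-- 	localBelligerents = list(localBelligerents)
-- 	aliveSoldiersSet = aliveSoldiers(localBelligerents, team)
-- 	differentAliveSoldiers = set()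
-- 	differentSoldiersHPs = set()
-- 	for soldier in aliveSoldiersSet:
-- 		if (not (localBelligerents[team][soldier] in differentSoldiersHPs)):
-- 			differentSoldiersHPs.add(localBelligerents[team][soldier])
-- 			differentAliveSoldiers.add(soldier)
-- 	return differentAliveSoldiers
-- ===== SOURCE B (Python) =====
-- def differentAliveSoldiers(localBelligerents, team):
--     localBelligerents = list(localBelligerents)
--     result = set()
--     seen_hps = set()
--     for soldier in range(5):
--         hp = localBelligerents[team][soldier]
--         if hp != 0 and hp not in seen_hps:
--             seen_hps.add(hp)
--             result.add(soldier)
--     return result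
-- ===== Notes on version B (the rewrite author's own statement) =====
-- stated objective: simpler
-- what changed: Fuses A's two passes (build an alive-soldier set via a helper, then a second dedup-by-HP loop over that set) into a single helper-free loop over range(5) that keeps a soldier exactly when its HP is nonzero and not yet seen.
import Mathlib
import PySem

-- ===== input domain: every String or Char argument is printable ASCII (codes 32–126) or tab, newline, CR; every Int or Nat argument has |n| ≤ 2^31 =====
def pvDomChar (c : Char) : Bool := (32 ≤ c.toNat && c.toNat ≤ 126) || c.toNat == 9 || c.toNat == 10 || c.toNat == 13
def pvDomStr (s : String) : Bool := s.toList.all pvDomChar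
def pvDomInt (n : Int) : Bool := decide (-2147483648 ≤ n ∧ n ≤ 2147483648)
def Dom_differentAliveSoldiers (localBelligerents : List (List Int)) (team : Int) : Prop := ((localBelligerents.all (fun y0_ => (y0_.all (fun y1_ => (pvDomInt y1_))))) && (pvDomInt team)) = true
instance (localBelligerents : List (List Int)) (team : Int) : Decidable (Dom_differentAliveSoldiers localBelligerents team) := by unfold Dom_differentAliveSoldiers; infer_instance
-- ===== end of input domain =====

-- B fuses A's two passes (helper building the alive set, then a dedup-by-HP loop over it) into one helper-free loop over range(5); same return value.


-- ===== PORT A =====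
-- helper aliveSoldiers: for soldier in range(5): if lb[team][soldier] != 0: add soldier
def aliveSoldiersA (localBelligerents : List (List Int)) (team : Int) : PySem.Set Int :=
  (PySem.List.pyRange 0 5 1).foldl
    (fun s soldier =>
      if PySem.List.pyGetD (PySem.List.pyGetD localBelligerents team []) soldier 0 ≠ 0
      then PySem.Set.add s soldier else s)
    PySem.Set.empty

-- CPython iterates this set of small ints 0..4 in ascending order, which equals its insertion order here.
def differentAliveSoldiers (localBelligerents : List (List Int)) (team : Int) : List Int :=
  let aliveSoldiersSet := aliveSoldiersA localBelligerents team
  (aliveSoldiersSet.foldl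
    (fun (p : PySem.Set Int × PySem.Set Int) soldier =>
      if ¬ (PySem.Set.contains p.2 (PySem.List.pyGetD (PySem.List.pyGetD localBelligerents team []) soldier 0) = true)
      then (PySem.Set.add p.1 soldier,
            PySem.Set.add p.2 (PySem.List.pyGetD (PySem.List.pyGetD localBelligerents team []) soldier 0))
      else p)
    (PySem.Set.empty, PySem.Set.empty)).1

-- ===== PORT B =====
def differentAliveSoldiers_alt (localBelligerents : List (List Int)) (team : Int) : List Int :=
  ((PySem.List.pyRange 0 5 1).foldl
    (fun (p : PySem.Set Int × PySem.Set Int) soldier =>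
      let hp := PySem.List.pyGetD (PySem.List.pyGetD localBelligerents team []) soldier 0
      if hp ≠ 0 ∧ ¬ (PySem.Set.contains p.2 hp = true)
      then (PySem.Set.add p.1 soldier, PySem.Set.add p.2 hp)
      else p)
    (PySem.Set.empty, PySem.Set.empty)).1

-- ===== PRECONDITION & SPEC =====
-- Pre_: lb[team] must exist (Python IndexError otherwise, negative team wraps) and have at least 5 entries.
def Pre_differentAliveSoldiers (localBelligerents : List (List Int)) (team : Int) : Prop :=
  5 ≤ ((PySem.List.pyGet? localBelligerents team).map List.length).getD 0
instance (localBelligerents : List (List Int)) (team : Int) : Decidable (Pre_differentAliveSoldiers localBelligerents team) := by unfold Pre_differentAliveSoldiers; infer_instance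
def pvWitness_differentAliveSoldiers : List (List Int) × Int := ([[1, 2, 0, 2, 3]], 0)

def Spec_differentAliveSoldiers (localBelligerents : List (List Int)) (team : Int) (out : List Int) : Prop := out = differentAliveSoldiers_alt localBelligerents team
instance (localBelligerents : List (List Int)) (team : Int) (out : List Int) : Decidable (Spec_differentAliveSoldiers localBelligerents team out) := by unfold Spec_differentAliveSoldiers; infer_instance

-- ===== CLAIM (what is proved, stated in full; the proofs are below) =====
def Claim_equal_differentAliveSoldiers : Prop := ∀ (localBelligerents : List (List Int)) (team : Int), Dom_differentAliveSoldiers localBelligerents team → Pre_differentAliveSoldiers localBelligerents team → Spec_differentAliveSoldiers localBelligerents team (differentAliveSoldiers localBelligerents team)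

-- ===== LEMMAS AND PROOFS =====

-- A's alive-set fold over a Nodup list disjoint from the accumulator is append-of-filter.
lemma alive_fold_eq_filter (f : Int → Int) (l : List Int) (acc : List Int)
    (hl : l.Nodup) (hd : ∀ x ∈ l, x ∉ acc) :
    l.foldl (fun s soldier => if f soldier ≠ 0 then PySem.Set.add s soldier else s) acc
      = acc ++ l.filter (fun soldier => f soldier ≠ 0) := by
  induction l generalizing acc with
  | nil => simp
  | cons x xs ih =>
    simp only [List.foldl_cons, List.filter_cons]
    by_cases hx : f x ≠ 0
    · rw [if_pos hx, PySem.Set.add_of_not_mem (hd x (by simp))]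
      rw [ih _ (List.nodup_cons.mp hl).2
        (fun y hy => by simp only [List.mem_append, List.mem_singleton]
                        push Not
                        exact ⟨hd y (List.mem_cons_of_mem _ hy),
                               fun h => (List.nodup_cons.mp hl).1 (h ▸ hy)⟩)]
      simp [hx]
    · rw [if_neg hx, ih _ (List.nodup_cons.mp hl).2
        (fun y hy => hd y (List.mem_cons_of_mem _ hy))]
      simp [hx]

-- Fusing the alive filter into the dedup fold.
lemma fuse_filter_fold (f : Int → Int) (l : List Int) (p : PySem.Set Int × PySem.Set Int) :
    (l.filter (fun soldier => f soldier ≠ 0)).foldl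
      (fun (p : PySem.Set Int × PySem.Set Int) soldier =>
        if ¬ (PySem.Set.contains p.2 (f soldier) = true)
        then (PySem.Set.add p.1 soldier, PySem.Set.add p.2 (f soldier)) else p) p
    = l.foldl
      (fun (p : PySem.Set Int × PySem.Set Int) soldier =>
        if f soldier ≠ 0 ∧ ¬ (PySem.Set.contains p.2 (f soldier) = true)
        then (PySem.Set.add p.1 soldier, PySem.Set.add p.2 (f soldier)) else p) p := by
  induction l generalizing p with
  | nil => rfl
  | cons x xs ih =>
    by_cases hx : f x = 0
    · simpa [List.filter_cons, hx] using ih p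
    · by_cases hc : f x ∈ p.2
      · simpa [List.filter_cons, hx, hc] using ih p
      · simpa [List.filter_cons, hx, hc] using
          ih (PySem.Set.add p.1 x, PySem.Set.add p.2 (f x))

-- ===== VERDICT (by name: the statement is the Claim_ definition above) =====
theorem differentAliveSoldiers_spec : Claim_equal_differentAliveSoldiers := by
  intro lb team _ _
  show differentAliveSoldiers lb team = differentAliveSoldiers_alt lb team
  simp only [differentAliveSoldiers, differentAliveSoldiers_alt, aliveSoldiersA]
  rw [alive_fold_eq_filter (fun s => PySem.List.pyGetD (PySem.List.pyGetD lb team []) s 0)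
        (PySem.List.pyRange 0 5 1) PySem.Set.empty (by decide)
        (fun x _ h => by simp [PySem.Set.empty] at h)]
  rw [show (PySem.Set.empty : List Int) = [] from rfl, List.nil_append,
      fuse_filter_fold (fun s => PySem.List.pyGetD (PySem.List.pyGetD lb team []) s 0)]
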